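-- pv_equiv track=rewrite | github.com/jonathonreilly/toy-physics | scripts/frontier_conformal_boundary.py | extract_boundary_slice
-- ===== SOURCE A (Python) =====
-- def extract_boundary_slice(dims: tuple[int, ...], axis: int = 0,
--                            position: int | None = None) -> list[int]:
--     """Return site indices of a (d-1)-dimensional slice at given position.
--
--     Slices perpendicular to `axis` at `position`.
--     """
--     ndim = len(dims)
--     if position is None:
--         position = dims[axis] // 2
--
--     from itertools import product
--     indices = []
--     ranges = [range(d) for d in dims]
--     for coords in product(*ranges):
--         if coords[axis] == position:
--             idx = 0
--             for k in range(ndim):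
--                 idx = idx * dims[k] + coords[k]
--             indices.append(idx)
--     return indices
-- ===== SOURCE B (Python) =====
-- def extract_boundary_slice(dims, axis=0, position=None):
--     """Return site indices of a (d-1)-dimensional slice at given position.
--
--     Recursive construction: only the coordinates of the slice itself are
--     enumerated (product of dims without `axis`), never the full grid.
--     """
--     ndim = len(dims)
--     d_axis = dims[axis]
--     if position is None:
--         position = d_axis // 2
--     if not (0 <= position < d_axis):
--         return []
--     ax = axis + ndim if axis < 0 else axis
--     return _slice(list(dims), ax, position)
--
--
-- def _width(dims):
--     w = 1
--     for d in dims: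
--         w *= d
--     return w
--
--
-- def _all_indices(dims):
--     if not dims:
--         return [0]
--     w = _width(dims[1:])
--     return [c * w + r for c in range(dims[0]) for r in _all_indices(dims[1:])]
--
--
-- def _slice(dims, ax, pos):
--     w = _width(dims[1:])
--     if ax == 0:
--         return [pos * w + r for r in _all_indices(dims[1:])]
--     return [c * w + r for c in range(dims[0]) for r in _slice(dims[1:], ax - 1, pos)]
-- ===== Notes on version B (the rewrite author's own statement) =====
-- stated objective: faster
-- what changed: Instead of enumerating the full grid product of all dims and filtering coordinates whose axis component equals position, B recursively builds only the slice itself (product of the dims other than axis, with the axis coordinate fixed), so the full-grid scan disappears.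
-- outside the precondition, e.g. on extract_boundary_slice((0,), 3, 1): A returns [], B raises IndexError
import Mathlib
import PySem

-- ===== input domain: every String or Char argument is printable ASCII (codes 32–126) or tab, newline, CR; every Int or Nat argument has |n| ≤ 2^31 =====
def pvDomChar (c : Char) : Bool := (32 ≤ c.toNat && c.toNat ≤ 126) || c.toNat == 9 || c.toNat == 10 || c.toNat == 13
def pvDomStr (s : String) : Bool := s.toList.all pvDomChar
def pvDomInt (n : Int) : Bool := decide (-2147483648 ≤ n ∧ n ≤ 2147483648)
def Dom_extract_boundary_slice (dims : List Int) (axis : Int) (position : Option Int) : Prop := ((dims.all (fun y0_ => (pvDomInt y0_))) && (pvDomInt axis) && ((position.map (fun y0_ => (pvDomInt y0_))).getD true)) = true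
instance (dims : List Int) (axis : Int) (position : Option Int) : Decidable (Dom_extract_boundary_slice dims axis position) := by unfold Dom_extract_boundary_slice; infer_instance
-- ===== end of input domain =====

-- B enumerates only the slice itself (the product of the dims other than `axis`) instead of
-- scanning the whole grid and filtering; objective: faster (asymptotic).

-- ===== PORT A =====
-- itertools.product(*[range(d) for d in dims]) in Python's lexicographic order
def pvProduct : List Int → List (List Int)
  | [] => [[]]
  | d :: rest => (PySem.List.pyRange 0 d 1).flatMap (fun c => (pvProduct rest).map (fun cs => c :: cs))

-- dims[axis] / coords[axis] / dims[k] / coords[k] are ported with pyGetD: under Pre_ every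
-- such index is in range, where pyGetD is exact Python indexing.
def extract_boundary_slice (dims : List Int) (axis : Int) (position : Option Int) : List Int :=
  let ndim : Int := dims.length
  let pos : Int := match position with
    | some p => p
    | none => PySem.Int.floordiv (PySem.List.pyGetD dims axis 0) 2
  (pvProduct dims).foldl
    (fun indices coords =>
      if PySem.List.pyGetD coords axis 0 == pos then
        indices ++ [(PySem.List.pyRange 0 ndim 1).foldl
          (fun idx k => idx * PySem.List.pyGetD dims k 0 + PySem.List.pyGetD coords k 0) 0]
      else indices) []

-- ===== PORT B =====
def pvWidth (dims : List Int) : Int := dims.foldl (· * ·) 1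

def pvAllIdx : List Int → List Int
  | [] => [0]
  | d :: rest => (PySem.List.pyRange 0 d 1).flatMap (fun c => (pvAllIdx rest).map (fun r => c * pvWidth rest + r))

def pvSlice : List Int → Int → Int → List Int
  | dims, ax, pos =>
    if ax = 0 then
      (pvAllIdx (dims.drop 1)).map (fun r => pos * pvWidth (dims.drop 1) + r)
    else
      match dims with
      | [] => []   -- Python's _slice would raise IndexError here; unreachable from extract_boundary_slice_alt (0 ≤ ax < len(dims))
      | _d :: rest => (PySem.List.pyRange 0 _d 1).flatMap (fun c => (pvSlice rest (ax - 1) pos).map (fun r => c * pvWidth rest + r))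

def extract_boundary_slice_alt (dims : List Int) (axis : Int) (position : Option Int) : List Int :=
  let ndim : Int := dims.length
  let d_axis : Int := PySem.List.pyGetD dims axis 0
  let pos : Int := match position with
    | some p => p
    | none => PySem.Int.floordiv d_axis 2
  if 0 ≤ pos ∧ pos < d_axis then
    pvSlice dims (if axis < 0 then axis + ndim else axis) pos
  else []

-- ===== PRECONDITION & SPEC =====
-- Pre_ excludes axis out of range [-len(dims), len(dims)): there Python A raises IndexError
-- (at dims[axis] or coords[axis]) except when the grid product is empty and position is given,
-- in which case A's [] is an accident of the loop body never running; B raises IndexError there.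
def Pre_extract_boundary_slice (dims : List Int) (axis : Int) (position : Option Int) : Prop :=
  -(dims.length : Int) ≤ axis ∧ axis < (dims.length : Int)
instance (dims : List Int) (axis : Int) (position : Option Int) : Decidable (Pre_extract_boundary_slice dims axis position) := by unfold Pre_extract_boundary_slice; infer_instance

def pvWitness_extract_boundary_slice : List Int × Int × Option Int := ([2, 3], 0, some 1)

def Spec_extract_boundary_slice (dims : List Int) (axis : Int) (position : Option Int) (out : List Int) : Prop := out = extract_boundary_slice_alt dims axis position
instance (dims : List Int) (axis : Int) (position : Option Int) (out : List Int) : Decidable (Spec_extract_boundary_slice dims axis position out) := by unfold Spec_extract_boundary_slice; infer_instance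

-- ===== CLAIM (what is proved, stated in full; the proofs are below) =====
def Claim_equal_extract_boundary_slice : Prop := ∀ (dims : List Int) (axis : Int) (position : Option Int), Dom_extract_boundary_slice dims axis position → Pre_extract_boundary_slice dims axis position → Spec_extract_boundary_slice dims axis position (extract_boundary_slice dims axis position)

-- ===== LEMMAS AND PROOFS =====

-- mixed-radix value of a coordinate tuple (suffix-product weights), the common spec of both ports
def flatR : List Int → List Int → Int
  | _ :: ds, c :: cs => c * pvWidth ds + flatR ds cs
  | _, _ => 0

theorem foldl_mul (l : List Int) (x : Int) : l.foldl (· * ·) x = x * l.foldl (· * ·) 1 := by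
  induction l generalizing x with
  | nil => simp
  | cons a l ih => simp only [List.foldl_cons]; rw [ih (x * a), ih (1 * a)]; ring

theorem width_cons (d : Int) (ds : List Int) : pvWidth (d :: ds) = d * pvWidth ds := by
  simp only [pvWidth, List.foldl_cons]; rw [foldl_mul ds (1 * d)]; ring

theorem horner_fold (ds : List Int) : ∀ (cs : List Int) (init : Int), cs.length = ds.length →
    (List.range ds.length).foldl (fun idx k => idx * ds.getD k 0 + cs.getD k 0) init
      = init * pvWidth ds + flatR ds cs := by
  induction ds with
  | nil => intro cs init _; simp [pvWidth, flatR]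
  | cons d ds ih =>
    intro cs init h
    cases cs with
    | nil => simp at h
    | cons c cs =>
      simp only [List.length_cons]
      rw [List.range_succ_eq_map]
      simp only [List.foldl_cons, List.foldl_map, List.getD_cons_zero, List.getD_cons_succ]
      rw [ih cs (init * d + c) (by simpa using h), width_cons]
      simp only [flatR]
      ring

theorem inner_eq (ds cs : List Int) (h : cs.length = ds.length) :
    (PySem.List.pyRange 0 (ds.length : Int) 1).foldl
      (fun idx k => idx * PySem.List.pyGetD ds k 0 + PySem.List.pyGetD cs k 0) 0 = flatR ds cs := by
  rw [PySem.List.pyRange_one]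
  simp only [sub_zero, Int.toNat_natCast, List.foldl_map, zero_add, PySem.List.pyGetD_natCast]
  rw [horner_fold ds cs 0 h]
  ring

theorem length_of_mem_product : ∀ (ds cs : List Int), cs ∈ pvProduct ds → cs.length = ds.length := by
  intro ds
  induction ds with
  | nil => intro cs h; simp [pvProduct] at h; simp [h]
  | cons d ds ih =>
    intro cs h
    simp only [pvProduct, List.mem_flatMap, List.mem_map] at h
    obtain ⟨c, _, cs', hcs', rfl⟩ := h
    simp [ih cs' hcs']

theorem bounds_of_mem_product : ∀ (ds cs : List Int), cs ∈ pvProduct ds →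
    ∀ k : Nat, k < ds.length → 0 ≤ cs.getD k 0 ∧ cs.getD k 0 < ds.getD k 0 := by
  intro ds
  induction ds with
  | nil => intro cs _ k hk; simp at hk
  | cons d ds ih =>
    intro cs h k hk
    simp only [pvProduct, List.mem_flatMap, List.mem_map] at h
    obtain ⟨c, hc, cs', hcs', rfl⟩ := h
    rw [PySem.List.mem_pyRange_one] at hc
    cases k with
    | zero => simpa using hc
    | succ k =>
      simp only [List.getD_cons_succ]
      exact ih cs' hcs' k (by simpa using hk)

theorem map_flatR_product : ∀ ds : List Int, (pvProduct ds).map (flatR ds) = pvAllIdx ds := by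
  intro ds
  induction ds with
  | nil => simp [pvProduct, pvAllIdx, flatR]
  | cons d ds ih =>
    simp only [pvProduct, pvAllIdx, List.map_flatMap]
    congr 1
    funext c
    rw [← ih, List.map_map, List.map_map]
    rfl

theorem flatMap_if_single {α : Type} (pos : Int) (g : Int → List α) :
    ∀ l : List Int, l.Nodup → pos ∈ l →
    (l.flatMap fun c => if c = pos then g c else []) = g pos := by
  intro l
  induction l with
  | nil => intro _ h; simp at h
  | cons a l ih =>
    intro hnd hmem
    simp only [List.flatMap_cons]
    rcases List.mem_cons.mp hmem with h | h
    · rw [if_pos h.symm]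
      have hz : (l.flatMap fun c => if c = pos then g c else []) = [] := by
        apply List.flatMap_eq_nil_iff.mpr
        intro x hx
        rw [if_neg]
        rintro rfl
        exact (List.nodup_cons.mp hnd).1 (h ▸ hx)
      rw [hz, List.append_nil, ← h]
    · rw [if_neg (by rintro rfl; exact (List.nodup_cons.mp hnd).1 h), List.nil_append]
      exact ih (List.nodup_cons.mp hnd).2 h

theorem slice_main : ∀ (ds : List Int) (a : Nat) (pos : Int), a < ds.length →
    0 ≤ pos → pos < ds.getD a 0 →
    ((pvProduct ds).filter (fun cs => cs.getD a 0 == pos)).map (flatR ds)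
      = pvSlice ds (a : Int) pos := by
  intro ds
  induction ds with
  | nil => intro a pos ha _ _; simp at ha
  | cons d rest ih =>
    intro a pos ha h0 hlt
    cases a with
    | zero =>
      have hlt' : pos < d := by simpa using hlt
      simp only [pvProduct, List.filter_flatMap, List.map_flatMap]
      trans ((PySem.List.pyRange 0 d 1).flatMap
        (fun c => if c = pos then (pvAllIdx rest).map (fun r => pos * pvWidth rest + r) else []))
      · congr 1
        funext c
        rw [List.filter_map]
        by_cases hc : c = pos
        · rw [if_pos hc]
          have ht : ((fun cs : List Int => cs.getD 0 0 == pos) ∘ fun cs => c :: cs) = fun _ => true := by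
            funext cs; simp [hc]
          rw [ht, List.filter_true, List.map_map, ← map_flatR_product rest, List.map_map, hc]
          rfl
        · rw [if_neg hc]
          have hf : ((fun cs : List Int => cs.getD 0 0 == pos) ∘ fun cs => c :: cs) = fun _ => false := by
            funext cs; simp [hc]
          rw [hf, List.filter_false]
          simp
      · rw [flatMap_if_single pos _ _ (PySem.List.nodup_pyRange_one 0 d)
          (PySem.List.mem_pyRange_one.mpr ⟨h0, hlt'⟩)]
        simp [pvSlice]
    | succ a =>
      have ha' : a < rest.length := by simpa using ha
      have hlt' : pos < rest.getD a 0 := by simpa using hlt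
      have hR : pvSlice (d :: rest) (((a + 1 : Nat)) : Int) pos
          = (PySem.List.pyRange 0 d 1).flatMap
              (fun c => (pvSlice rest (a : Int) pos).map (fun r => c * pvWidth rest + r)) := by
        simp only [pvSlice]
        rw [if_neg (by omega)]
        norm_num
      rw [hR]
      simp only [pvProduct, List.filter_flatMap, List.map_flatMap]
      congr 1
      funext c
      rw [List.filter_map]
      have ht : ((fun cs : List Int => cs.getD (a + 1) 0 == pos) ∘ fun cs => c :: cs)
          = fun cs : List Int => cs.getD a 0 == pos := by
        funext cs; simp
      rw [ht, ← ih a pos ha' h0 hlt', List.map_map, List.map_map]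
      rfl

theorem filter_product_nil (ds : List Int) (a : Nat) (pos : Int) (ha : a < ds.length)
    (h : ¬ (0 ≤ pos ∧ pos < ds.getD a 0)) :
    (pvProduct ds).filter (fun cs => cs.getD a 0 == pos) = [] := by
  apply List.filter_eq_nil_iff.mpr
  intro cs hcs hd
  have hb := bounds_of_mem_product ds cs hcs a ha
  rw [beq_iff_eq] at hd
  exact h (hd ▸ hb)

theorem pyGetD_norm (xs : List Int) (i : Int) (h1 : -(xs.length : Int) ≤ i) (h2 : i < (xs.length : Int)) :
    PySem.List.pyGetD xs i 0 = xs.getD (if i < 0 then i + xs.length else i).toNat 0 := by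
  simp only [PySem.List.pyGetD, PySem.List.pyGet?, PySem.List.pyIdx?]
  by_cases hneg : 0 ≤ i
  · rw [if_pos hneg, if_pos h2, if_neg (show ¬ i < 0 by omega)]
    simp [List.getD_eq_getElem?_getD]
  · rw [if_neg hneg, if_pos h1, if_pos (show i < 0 by omega)]
    have hidx : xs.length - (-i).toNat = (i + (xs.length : Int)).toNat := by omega
    simp [hidx, List.getD_eq_getElem?_getD]

theorem core_eq (dims : List Int) (axis pos : Int)
    (h1 : -(dims.length : Int) ≤ axis) (h2 : axis < (dims.length : Int)) :
    (pvProduct dims).foldl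
      (fun indices coords =>
        if PySem.List.pyGetD coords axis 0 == pos then
          indices ++ [(PySem.List.pyRange 0 (dims.length : Int) 1).foldl
            (fun idx k => idx * PySem.List.pyGetD dims k 0 + PySem.List.pyGetD coords k 0) 0]
        else indices) []
    = if 0 ≤ pos ∧ pos < PySem.List.pyGetD dims axis 0 then
        pvSlice dims (if axis < 0 then axis + (dims.length : Int) else axis) pos
      else [] := by
  have hn : 0 < dims.length := by omega
  set a : Nat := (if axis < 0 then axis + (dims.length : Int) else axis).toNat with hadef
  have haz : ((a : Int)) = if axis < 0 then axis + (dims.length : Int) else axis := by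
    rw [hadef, Int.toNat_of_nonneg (by split_ifs <;> omega)]
  have ha_lt : a < dims.length := by
    have : (a : Int) < (dims.length : Int) := by rw [haz]; split_ifs <;> omega
    exact_mod_cast this
  have hdax : PySem.List.pyGetD dims axis 0 = dims.getD a 0 := by
    rw [pyGetD_norm dims axis h1 h2, ← hadef]
  rw [PySem.List.foldl_append_if
    (fun coords => PySem.List.pyGetD coords axis 0 == pos)
    (fun coords => (PySem.List.pyRange 0 (dims.length : Int) 1).foldl
      (fun idx k => idx * PySem.List.pyGetD dims k 0 + PySem.List.pyGetD coords k 0) 0)]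
  rw [List.nil_append]
  have hfil : (pvProduct dims).filter (fun cs => PySem.List.pyGetD cs axis 0 == pos)
      = (pvProduct dims).filter (fun cs => cs.getD a 0 == pos) :=
    List.filter_congr (fun cs hcs => by
      have hlen := length_of_mem_product dims cs hcs
      rw [pyGetD_norm cs axis (by rw [hlen]; exact h1) (by rw [hlen]; exact h2), hlen, ← hadef])
  have hmap : ((pvProduct dims).filter (fun cs => cs.getD a 0 == pos)).map
        (fun coords => (PySem.List.pyRange 0 (dims.length : Int) 1).foldl
          (fun idx k => idx * PySem.List.pyGetD dims k 0 + PySem.List.pyGetD coords k 0) 0)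
      = ((pvProduct dims).filter (fun cs => cs.getD a 0 == pos)).map (flatR dims) :=
    List.map_congr_left (fun cs hcs =>
      inner_eq dims cs (length_of_mem_product dims cs (List.mem_of_mem_filter hcs)))
  rw [hfil, hmap, hdax, ← haz]
  by_cases hin : 0 ≤ pos ∧ pos < dims.getD a 0
  · rw [if_pos hin]
    exact slice_main dims a pos ha_lt hin.1 hin.2
  · rw [if_neg hin, filter_product_nil dims a pos ha_lt hin]
    simp

-- ===== VERDICT (by name: the statement is the Claim_ definition above) =====
theorem extract_boundary_slice_spec : Claim_equal_extract_boundary_slice := by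
  unfold Claim_equal_extract_boundary_slice
  intro dims axis position _hdom hpre
  unfold Pre_extract_boundary_slice at hpre
  unfold Spec_extract_boundary_slice
  obtain ⟨h1, h2⟩ := hpre
  cases position with
  | none =>
    simp only [extract_boundary_slice, extract_boundary_slice_alt]
    exact core_eq dims axis _ h1 h2
  | some p =>
    simp only [extract_boundary_slice, extract_boundary_slice_alt]
    exact core_eq dims axis p h1 h2
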